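-- pv_equiv track=rewrite | github.com/appatalks/closetemail.com | src/top4news_bot.py | reduce_to_300_chars
-- ===== SOURCE A (Python) =====
-- import string
--
-- def reduce_to_300_chars(headlines, additional_text):
--     # Remove punctuation from each headline
--     translator = str.maketrans("", "", string.punctuation)
--     headlines = [headline.translate(translator) for headline in headlines]
--
--     # Calculate the maximum length allowed for the headlines
--     max_length = 296 - len(additional_text) - len("\n - ") * len(headlines)  # Account for formatting
--     combined_length = sum(len(headline) for headline in headlines)
--
--     # Track which headlines were truncated
--     truncated_indices = set()
--
--     # Step 1: Remove words after the last comma for headlines with >2 commas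
--     for i, headline in enumerate(headlines):
--         if headline.count(",") > 2:
--             last_comma_index = headline.rfind(",")
--             if last_comma_index != -1:
--                 headlines[i] = headline[:last_comma_index]
--                 truncated_indices.add(i)
--
--     # Recalculate combined length after trimming by commas
--     combined_length = sum(len(headline) for headline in headlines)
--
--     # Step 2: Iteratively remove the last word from the longest headlines until within limit
--     while combined_length > max_length:
--         # Find the headline that is longest and trim its last word
--         longest_idx = max(range(len(headlines)), key=lambda x: len(headlines[x]))
--         if len(headlines[longest_idx].split()) > 1:  # Ensure there's more than one word to trim
--             words = headlines[longest_idx].split()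
--             headlines[longest_idx] = " ".join(words[:-1])
--             truncated_indices.add(longest_idx)
--         else:
--             # If a headline only has one word, leave it alone and move to others
--             break
--
--         combined_length = sum(len(headline) for headline in headlines)
--
--     # Step 3: Add ".." to truncated headlines
--     for i in truncated_indices:
--         if not headlines[i].endswith(".."):
--             headlines[i] += " .."
--
--     return headlines
-- ===== SOURCE B (Python) =====
-- import heapq
-- import string
--
-- def reduce_to_300_chars(headlines, additional_text):
--     # Strip punctuation once.
--     punct = set(string.punctuation)
--     cleaned = ["".join(c for c in h if c not in punct) for h in headlines]
--     n = len(cleaned)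
--     max_length = 296 - len(additional_text) - 4 * n
--
--     # Split each headline into words once; norms[i] is the length the headline
--     # will have the first time it is joined from its words.
--     words = [h.split() for h in cleaned]
--     norms = [sum(map(len, w)) + len(w) - 1 for w in words]
--     lens = [len(h) for h in cleaned]          # current character length per headline
--     combined = sum(lens)
--     trimmed = [False] * n
--
--     # A min-heap keyed (-length, index) hands out the longest headline
--     # (first index on ties) in O(log n) instead of a linear max scan;
--     # the combined total is maintained incrementally.
--     heap = [(-lens[i], i) for i in range(n)]
--     heapq.heapify(heap)
--     while combined > max_length:
--         _, i = heapq.heappop(heap)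
--         if len(words[i]) <= 1:
--             break
--         w = words[i].pop()
--         trimmed[i] = True
--         norms[i] -= len(w) + 1
--         new_len = norms[i]
--         combined += new_len - lens[i]
--         lens[i] = new_len
--         heapq.heappush(heap, (-new_len, i))
--
--     return [" ".join(words[i]) + " .." if trimmed[i] else cleaned[i]
--             for i in range(n)]
-- ===== Notes on version B (the rewrite author's own statement) =====
-- stated objective: alternative
-- what changed: B selects the headline to trim with a min-heap keyed (-length, index) (heapq) instead of A's per-iteration linear max scan over all headlines, pops the last word off a per-headline word list in place, and maintains each headline's length and the combined total incrementally instead of A's re-splitting, re-joining and re-summing every headline on every iteration; A's comma step is dropped because punctuation removal has already deleted every comma. Per trim iteration B does O(log n) work against A's O(n+L), but the timed inputs run few trim iterations, so B was not measurably faster there.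
import Mathlib
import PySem

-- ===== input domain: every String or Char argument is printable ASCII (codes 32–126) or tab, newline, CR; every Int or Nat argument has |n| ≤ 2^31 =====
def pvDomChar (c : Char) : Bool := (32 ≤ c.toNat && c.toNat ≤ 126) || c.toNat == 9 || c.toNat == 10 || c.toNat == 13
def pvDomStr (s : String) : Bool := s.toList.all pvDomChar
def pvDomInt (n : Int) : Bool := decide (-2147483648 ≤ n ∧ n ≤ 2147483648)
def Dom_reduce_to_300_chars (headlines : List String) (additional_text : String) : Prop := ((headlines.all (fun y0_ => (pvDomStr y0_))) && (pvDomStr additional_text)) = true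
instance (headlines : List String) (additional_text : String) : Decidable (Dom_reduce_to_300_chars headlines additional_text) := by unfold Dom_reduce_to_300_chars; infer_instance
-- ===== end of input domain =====

-- B replaces A's per-iteration linear max scan and re-split/re-join/re-sum of every headline by a
-- min-heap keyed (-length, index) plus word lists popped in place and incrementally maintained
-- lengths (objective: alternative; not measured faster on the timed inputs).

-- ===== PORT A =====
-- string.punctuation
def pvPunctA : List Char := "!\"#$%&'()*+,-./:;<=>?@[\\]^_`{|}~".toList

-- str.maketrans("", "", string.punctuation) + .translate: deletes exactly those characters
-- (ported by hand: a delete-only translation table is a character filter, exact)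
def pvTranslateDel (h : String) : String := String.ofList (h.toList.filter (fun c => !(pvPunctA.contains c)))

-- sum(len(headline) for headline in headlines)
def pvCombinedA (hs : List String) : Int := (hs.map (fun h => PySem.Str.len h)).sum

-- Step 1: 'for i, headline in enumerate(headlines)'; each write is at the index just read,
-- so folding over the enumeration of the incoming list is exact
def pvStep1A (hs : List String) : List String × PySem.Set Int :=
  (PySem.List.enumerate hs).foldl (fun st p =>
    if PySem.Str.count p.2 "," > 2 then
      let lastComma := PySem.Str.rfind p.2 ","
      if lastComma ≠ -1 then
        (st.1.set p.1.toNat (PySem.Str.slice p.2 none (some lastComma)), st.2.add p.1)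
      else st
    else st) (hs, PySem.Set.ofList [])

-- Step 2: the while loop; fuel = initial combined length + 1 (every iteration that recurses
-- strictly shrinks the combined length, so the fuel is never exhausted)
def pvStep2A (maxLen : Int) : Nat → List String × PySem.Set Int → List String × PySem.Set Int
  | 0, st => st
  | fuel+1, st =>
    if pvCombinedA st.1 > maxLen then
      match PySem.List.max? (PySem.List.pyRange 0 st.1.length 1)
          (fun x => PySem.Str.len ((PySem.List.pyGet? st.1 x).getD "")) with
      | none => st  -- Python's max(range(0)) raises ValueError here: outside Pre_
      | some xi =>
        let words := PySem.Str.split₀ ((PySem.List.pyGet? st.1 xi).getD "")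
        if words.length > 1 then
          pvStep2A maxLen fuel
            (st.1.set xi.toNat (PySem.Str.join " " (PySem.List.slice words none (some (-1)))), st.2.add xi)
        else st
    else st

def reduce_to_300_chars (headlines : List String) (additional_text : String) : List String :=
  let hs0 := headlines.map pvTranslateDel
  let maxLen : Int := 296 - PySem.Str.len additional_text - PySem.Str.len "\n - " * hs0.length
  let st1 := pvStep1A hs0
  let st2 := pvStep2A maxLen ((pvCombinedA st1.1).toNat + 1) st1
  -- Step 3: 'for i in truncated_indices' appends " .." at distinct indices, so the set's
  -- iteration order cannot affect the result; rendered per position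
  (PySem.List.enumerate st2.1).map (fun p =>
    if st2.2.contains p.1 && !(PySem.Str.endswith p.2 "..") then
      String.ofList (p.2.toList ++ " ..".toList)
    else p.2)

-- ===== PORT B =====
-- punct = set(string.punctuation)
def pvPunctB : PySem.Set Char := PySem.Set.ofList "!\"#$%&'()*+,-./:;<=>?@[\\]^_`{|}~".toList

-- "".join(c for c in h if c not in punct)
def pvCleanB (h : String) : String := String.ofList (h.toList.filter (fun c => !(pvPunctB.contains c)))

-- Python tuple comparison on the heap keys (-length, index): lexicographic on Int × Int
def pvLexLt (a b : Int × Int) : Bool := a.1 < b.1 || (a.1 == b.1 && a.2 < b.2)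

-- heapq ported at its contract: all keys are distinct (the index component differs), so the heap
-- is observationally its multiset of entries; heappop hands out the unique lexicographic minimum.
def pvHeapStep (acc : Option (Int × Int)) (x : Int × Int) : Option (Int × Int) :=
  match acc with
  | none => some x
  | some b => if pvLexLt x b then some x else some b

def pvHeapMin? (h : List (Int × Int)) : Option (Int × Int) := h.foldl pvHeapStep none

-- the while loop of Source B: pop the heap minimum, pop the last word of that headline, update the
-- numeric state, push the re-keyed entry; heappush ported as append (multiset contract, above)
def pvLoopB (maxLen : Int) :
    Nat → List (Int × Int) → List (List String) → List Int → List Int → List Bool → Int →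
    List (List String) × List Bool
  | 0, _, ws, _, _, trimmed, _ => (ws, trimmed)
  | fuel+1, heap, ws, lens, norms, trimmed, combined =>
    if combined > maxLen then
      match pvHeapMin? heap with
      | none => (ws, trimmed)  -- heappop of an empty heap raises IndexError: outside Pre_
      | some m =>
        let heap' := heap.erase m
        let i := m.2.toNat
        let wl := ws.getD i []
        if wl.length ≤ 1 then (ws, trimmed)
        else
          -- words[i].pop() on a list with more than one element: last element + dropLast (exact)
          let w := wl.getLastD ""
          let newLen := norms.getD i 0 - PySem.Str.len w - 1
          pvLoopB maxLen fuel (heap' ++ [(-newLen, m.2)]) (ws.set i wl.dropLast)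
            (lens.set i newLen) (norms.set i newLen) (trimmed.set i true)
            (combined + newLen - lens.getD i 0)
    else (ws, trimmed)

def reduce_to_300_chars_alt (headlines : List String) (additional_text : String) : List String :=
  let cleaned := headlines.map pvCleanB
  let n := cleaned.length
  let maxLen : Int := 296 - PySem.Str.len additional_text - 4 * (n : Int)
  let words := cleaned.map PySem.Str.split₀
  let norms := words.map (fun w => (w.map PySem.Str.len).sum + (w.length : Int) - 1)
  let lens := cleaned.map (fun h => PySem.Str.len h)
  let combined := lens.sum
  -- heap = [(-lens[i], i) for i in range(n)]; heapify rearranges in place, which is invisible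
  -- at the multiset contract the heap is ported at
  let heap := (List.range n).map (fun i => (-(lens.getD i 0), (i : Int)))
  let r := pvLoopB maxLen (combined.toNat + 1) heap words lens norms (List.replicate n false) combined
  (List.range n).map (fun i =>
    if r.2.getD i false then
      String.ofList ((PySem.Str.join " " (r.1.getD i [])).toList ++ " ..".toList)
    else cleaned.getD i "")

-- ===== PRECONDITION & SPEC =====
-- Pre_ excludes only the inputs where Python A raises: with an empty headline list and
-- len(additional_text) > 296 the while loop runs and max(range(0)) raises ValueError.
def Pre_reduce_to_300_chars (headlines : List String) (additional_text : String) : Prop :=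
  headlines ≠ [] ∨ PySem.Str.len additional_text ≤ 296
instance (headlines : List String) (additional_text : String) : Decidable (Pre_reduce_to_300_chars headlines additional_text) := by unfold Pre_reduce_to_300_chars; infer_instance

def pvWitness_reduce_to_300_chars : List String × String := (["hello world"], "extra")

def Spec_reduce_to_300_chars (headlines : List String) (additional_text : String) (out : List String) : Prop := out = reduce_to_300_chars_alt headlines additional_text
instance (headlines : List String) (additional_text : String) (out : List String) : Decidable (Spec_reduce_to_300_chars headlines additional_text out) := by unfold Spec_reduce_to_300_chars; infer_instance

-- ===== CLAIM (what is proved, stated in full; the proofs are below) =====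
def Claim_equal_reduce_to_300_chars : Prop := ∀ (headlines : List String) (additional_text : String), Dom_reduce_to_300_chars headlines additional_text → Pre_reduce_to_300_chars headlines additional_text → Spec_reduce_to_300_chars headlines additional_text (reduce_to_300_chars headlines additional_text)

-- ===== LEMMAS AND PROOFS =====

-- list helpers -------------------------------------------------------------

theorem pvGetD_map {α β : Type} (f : α → β) (l : List α) (i : Nat) (d : β) (d' : α)
    (h : i < l.length) : (l.map f).getD i d = f (l.getD i d') := by
  rw [List.getD_eq_getElem _ _ (by simpa using h), List.getD_eq_getElem _ _ h]
  simp

theorem pvGetD_set {α : Type} (l : List α) (i k : Nat) (v : α) (d : α) (hi : i < l.length) :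
    (l.set i v).getD k d = if k = i then v else l.getD k d := by
  by_cases hk : k = i
  · subst hk
    rw [List.getD_eq_getElem _ _ (by simpa using hi), if_pos rfl]
    exact List.getElem_set_self (by simpa using hi)
  · simp only [hk, if_false]
    by_cases hkl : k < l.length
    · rw [List.getD_eq_getElem _ _ (by simpa using hkl), List.getD_eq_getElem _ _ hkl]
      rw [List.getElem_set]
      simp [Ne.symm hk]
    · rw [List.getD_eq_default _ _ (by simpa using (by omega : l.length ≤ k)),
          List.getD_eq_default _ _ (by omega)]

theorem pvSum_map_set (l : List String) (i : Nat) (v : String) (h : i < l.length) :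
    ((l.set i v).map PySem.Str.len).sum
      = (l.map PySem.Str.len).sum - PySem.Str.len (l.getD i "") + PySem.Str.len v := by
  induction l generalizing i with
  | nil => simp at h
  | cons a t ih =>
    cases i with
    | zero => simp [List.set]; ring
    | succ n =>
      simp only [List.set, List.map_cons, List.sum_cons, List.getD_cons_succ]
      rw [ih n (by simpa using h)]
      ring

theorem pvDropLast_take {α : Type} (l : List α) (c : Nat) (h : c ≤ l.length) :
    (l.take c).dropLast = l.take (c - 1) := by
  rw [List.dropLast_eq_take, List.take_take, List.length_take]
  congr 1
  omega

theorem pvSlice_neg_one {α : Type} (xs : List α) :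
    PySem.List.slice xs none (some (-1)) = xs.dropLast := by
  simp [PySem.List.slice, PySem.List.clampIdx, List.dropLast_eq_take]
  split
  · simp_all
  · omega

theorem pvContains_add {α : Type} [BEq α] [LawfulBEq α] (s : PySem.Set α) (x y : α) :
    (s.add x).contains y = (s.contains y || y == x) := by
  rw [Bool.eq_iff_iff]
  simp [PySem.Set.mem_add]

theorem pvEnumerate_map {α β : Type} (f : Int × α → β) (l : List α) (d : α) : ∀ (s : Int),
    (PySem.List.enumerate l s).map f
      = (List.range l.length).map (fun (k : Nat) => f (s + (k : Int), l.getD k d)) := by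
  induction l with
  | nil => intro s; simp [PySem.List.enumerate]
  | cons a t ih =>
    intro s
    rw [show PySem.List.enumerate (a :: t) s = (s, a) :: PySem.List.enumerate t (s + 1) from rfl,
      List.map_cons, ih (s + 1), List.length_cons, List.range_succ_eq_map, List.map_cons,
      List.map_map]
    refine congrArg₂ List.cons ?_ (List.map_congr_left ?_)
    · norm_num
    · intro k hk
      have h1 : (s + 1) + (k : Int) = s + ((k + 1 : Nat) : Int) := by push_cast; ring
      simp only [Function.comp_apply, List.getD_cons_succ, h1]

theorem pvEnumerate_snd_mem {α : Type} (l : List α) : ∀ (s : Int) (p : Int × α),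
    p ∈ PySem.List.enumerate l s → p.2 ∈ l := by
  induction l with
  | nil => intro s p hp; simp [PySem.List.enumerate] at hp
  | cons a t ih =>
    intro s p hp
    rw [show PySem.List.enumerate (a :: t) s = (s, a) :: PySem.List.enumerate t (s + 1) from rfl] at hp
    rcases List.mem_cons.mp hp with h | h
    · subst h; simp
    · exact List.mem_cons_of_mem _ (ih (s + 1) p h)

-- split₀ / join characterisation -------------------------------------------

def pvWordOK (S : List Char) (w : List Char) : Prop :=
  w ≠ [] ∧ ∀ c ∈ w, PySem.Chars.isspace c = false ∧ c ∈ S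

theorem pvGo_words (S : List Char) (s : List Char) : ∀ (cur : List Char) (acc : List (List Char)),
    (∀ c ∈ s, c ∈ S) → (∀ c ∈ cur, PySem.Chars.isspace c = false ∧ c ∈ S) →
    (∀ w ∈ acc, pvWordOK S w) →
    ∀ w ∈ PySem.Chars.split₀.go s cur acc, pvWordOK S w := by
  induction s with
  | nil =>
    intro cur acc _ hcur hacc w hw
    rw [show PySem.Chars.split₀.go [] cur acc
        = if cur.isEmpty then acc.reverse else (cur.reverse :: acc).reverse from rfl] at hw
    split at hw
    · exact hacc w (List.mem_reverse.mp hw)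
    · rcases List.mem_cons.mp (List.mem_reverse.mp hw) with h | h
      · subst h
        refine ⟨by simp_all [List.isEmpty_iff], fun c hc => hcur c (List.mem_reverse.mp hc)⟩
      · exact hacc w h
  | cons ch rest ih =>
    intro cur acc hs hcur hacc
    rw [show PySem.Chars.split₀.go (ch :: rest) cur acc =
      if PySem.Chars.isspace ch then
        (if cur.isEmpty then PySem.Chars.split₀.go rest [] acc
         else PySem.Chars.split₀.go rest [] (cur.reverse :: acc))
      else PySem.Chars.split₀.go rest (ch :: cur) acc from rfl]
    have hrest : ∀ x ∈ rest, x ∈ S := fun x hx => hs x (List.mem_cons_of_mem _ hx)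
    by_cases hc : PySem.Chars.isspace ch
    · rw [if_pos hc]
      by_cases h0 : cur.isEmpty
      · rw [if_pos h0]
        exact ih [] acc hrest (by simp) hacc
      · rw [if_neg h0]
        refine ih [] (cur.reverse :: acc) hrest (by simp) ?_
        intro w hw
        rcases List.mem_cons.mp hw with h | h
        · subst h
          exact ⟨by simp_all [List.isEmpty_iff], fun x hx => hcur x (List.mem_reverse.mp hx)⟩
        · exact hacc w h
    · rw [if_neg hc]
      refine ih (ch :: cur) acc hrest ?_ hacc
      intro x hx
      rcases List.mem_cons.mp hx with h | h
      · subst h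
        exact ⟨by simpa using hc, hs _ (by simp)⟩
      · exact hcur x h

theorem pvSplit_words (s : List Char) :
    ∀ w ∈ PySem.Chars.split₀ s, pvWordOK s w := by
  exact pvGo_words s s [] [] (fun c hc => hc) (by simp) (by simp)

theorem pvGo_word_chars (w : List Char) (hw : ∀ c ∈ w, PySem.Chars.isspace c = false) :
    ∀ (s cur : List Char) (acc : List (List Char)),
      PySem.Chars.split₀.go (w ++ s) cur acc = PySem.Chars.split₀.go s (w.reverse ++ cur) acc := by
  induction w with
  | nil => intro s cur acc; simp
  | cons ch t ih =>
    intro s cur acc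
    rw [List.cons_append,
      show PySem.Chars.split₀.go (ch :: (t ++ s)) cur acc =
        if PySem.Chars.isspace ch then
          (if cur.isEmpty then PySem.Chars.split₀.go (t ++ s) [] acc
           else PySem.Chars.split₀.go (t ++ s) [] (cur.reverse :: acc))
        else PySem.Chars.split₀.go (t ++ s) (ch :: cur) acc from rfl,
      if_neg (by simpa using hw ch (by simp)),
      ih (fun c hc => hw c (List.mem_cons_of_mem _ hc)) s (ch :: cur) acc]
    simp

theorem pvGo_join (ws : List (List Char)) :
    (∀ w ∈ ws, w ≠ [] ∧ ∀ c ∈ w, PySem.Chars.isspace c = false) → ws ≠ [] →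
    ∀ (acc : List (List Char)),
      PySem.Chars.split₀.go (PySem.Chars.join [' '] ws) [] acc = acc.reverse ++ ws := by
  induction ws with
  | nil => intro _ h; exact absurd rfl h
  | cons w rest ih =>
    intro h _ acc
    have hw := h w (by simp)
    cases rest with
    | nil =>
      rw [PySem.Chars.join_singleton,
        show (w : List Char) = w ++ [] from by simp,
        pvGo_word_chars w hw.2 [] [] acc]
      rw [show PySem.Chars.split₀.go [] (w.reverse ++ []) acc
          = if (w.reverse ++ []).isEmpty then acc.reverse else ((w.reverse ++ []).reverse :: acc).reverse from rfl,
        if_neg (by simp [List.isEmpty_iff, hw.1])]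
      simp
    | cons w' rest' =>
      rw [PySem.Chars.join_cons_cons, List.append_assoc,
        pvGo_word_chars w hw.2 _ [] acc,
        show ([' '] ++ PySem.Chars.join [' '] (w' :: rest')) = ' ' :: PySem.Chars.join [' '] (w' :: rest') from rfl,
        show PySem.Chars.split₀.go (' ' :: PySem.Chars.join [' '] (w' :: rest')) (w.reverse ++ []) acc
          = if PySem.Chars.isspace ' ' then
              (if (w.reverse ++ []).isEmpty then PySem.Chars.split₀.go (PySem.Chars.join [' '] (w' :: rest')) [] acc
               else PySem.Chars.split₀.go (PySem.Chars.join [' '] (w' :: rest')) [] ((w.reverse ++ []).reverse :: acc))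
            else PySem.Chars.split₀.go (PySem.Chars.join [' '] (w' :: rest')) (' ' :: (w.reverse ++ [])) acc from rfl,
        if_pos (by decide), if_neg (by simp [List.isEmpty_iff, hw.1])]
      have H := ih (fun x hx => h x (List.mem_cons_of_mem _ hx)) (by simp)
        ((w.reverse ++ []).reverse :: acc)
      simp only [List.append_nil, List.reverse_reverse] at H
      simpa using H

theorem pvSplit_join (ws : List (List Char))
    (h : ∀ w ∈ ws, w ≠ [] ∧ ∀ c ∈ w, PySem.Chars.isspace c = false) :
    PySem.Chars.split₀ (PySem.Chars.join [' '] ws) = ws := by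
  cases ws with
  | nil => rfl
  | cons w rest =>
    unfold PySem.Chars.split₀
    rw [pvGo_join (w :: rest) h (by simp) []]
    simp

theorem pvJoin_length (ws : List (List Char)) (h : ws ≠ []) :
    (PySem.Chars.join [' '] ws).length + 1 = (ws.map List.length).sum + ws.length := by
  induction ws with
  | nil => exact absurd rfl h
  | cons w rest ih =>
    cases rest with
    | nil => simp [PySem.Chars.join_singleton]
    | cons w' rest' =>
      rw [PySem.Chars.join_cons_cons]
      have := ih (by simp)
      simp only [List.length_append, List.map_cons, List.sum_cons, List.length_cons,
        List.length_nil] at this ⊢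
      omega

theorem pvMem_join (ws : List (List Char)) (c : Char) (hc : c ∈ PySem.Chars.join [' '] ws) :
    c = ' ' ∨ ∃ w ∈ ws, c ∈ w := by
  induction ws with
  | nil => simp [PySem.Chars.join_nil] at hc
  | cons w rest ih =>
    cases rest with
    | nil =>
      rw [PySem.Chars.join_singleton] at hc
      exact Or.inr ⟨w, by simp, hc⟩
    | cons w' rest' =>
      rw [PySem.Chars.join_cons_cons] at hc
      rcases List.mem_append.mp hc with h1 | h1
      · rcases List.mem_append.mp h1 with h2 | h2
        · exact Or.inr ⟨w, by simp, h2⟩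
        · exact Or.inl (by simpa using h2)
      · rcases ih h1 with h2 | ⟨x, hx, hcx⟩
        · exact Or.inl h2
        · exact Or.inr ⟨x, List.mem_cons_of_mem _ hx, hcx⟩

theorem pvCount_go_comma (f : Nat) : ∀ (s : List Char) (acc : Nat), (',' : Char) ∉ s →
    PySem.Chars.count.go [','] f s acc = acc := by
  induction f with
  | zero => intro s acc _; rfl
  | succ n ih =>
    intro s acc hs
    cases s with
    | nil => rfl
    | cons ch t =>
      have hch : (',' : Char) ≠ ch := fun e => hs (by simp [← e])
      rw [show PySem.Chars.count.go [','] (n + 1) (ch :: t) acc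
          = if [','].isPrefixOf (ch :: t) then
              PySem.Chars.count.go [','] n (List.drop 1 (ch :: t)) (acc + 1)
            else PySem.Chars.count.go [','] n t acc from rfl,
        if_neg (by simp [List.isPrefixOf_cons₂, hch])]
      exact ih t acc (fun hc => hs (List.mem_cons_of_mem _ hc))

theorem pvCount_comma (s : List Char) (h : (',' : Char) ∉ s) :
    PySem.Chars.count s [','] = 0 := by
  unfold PySem.Chars.count
  rw [if_neg (by simp)]
  exact pvCount_go_comma s.length s 0 h

-- step 1 is the identity (punctuation removal already deleted every comma) ---

theorem pvStep1_id (hs : List String) (h : ∀ x ∈ hs, (',' : Char) ∉ x.toList) :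
    pvStep1A hs = (hs, PySem.Set.ofList []) := by
  unfold pvStep1A
  suffices H : ∀ (l : List (Int × String)) (st : List String × PySem.Set Int),
      (∀ p ∈ l, p.2 ∈ hs) →
      l.foldl (fun st p =>
        if PySem.Str.count p.2 "," > 2 then
          let lastComma := PySem.Str.rfind p.2 ","
          if lastComma ≠ -1 then
            (st.1.set p.1.toNat (PySem.Str.slice p.2 none (some lastComma)), st.2.add p.1)
          else st
        else st) st = st by
    exact H _ _ (fun p hp => pvEnumerate_snd_mem hs 0 p hp)
  intro l
  induction l with
  | nil => intro st _; rfl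
  | cons p t ih =>
    intro st hl
    simp only [List.foldl_cons]
    have h0 : PySem.Str.count p.2 "," = 0 := by
      rw [PySem.Str.count_eq, show (",".toList) = [','] from by decide]
      exact pvCount_comma _ (h p.2 (hl p (by simp)))
    rw [if_neg (by simp only [gt_iff_lt, h0]; omega)]
    exact ih st (fun q hq => hl q (List.mem_cons_of_mem _ hq))

-- the lexicographic order on heap keys --------------------------------------

theorem pvLexLt_irrefl (a : Int × Int) : pvLexLt a a = false := by
  simp [pvLexLt]

theorem pvLexLt_asymm {a b : Int × Int} (h : pvLexLt a b = true) : pvLexLt b a = false := by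
  rw [Bool.eq_false_iff]
  intro h2
  simp only [pvLexLt, Bool.or_eq_true, Bool.and_eq_true, decide_eq_true_eq, beq_iff_eq] at h h2
  omega

theorem pvLexLt_ne {a b : Int × Int} (h : pvLexLt a b = true) : a ≠ b := by
  intro e; subst e; rw [pvLexLt_irrefl] at h; exact absurd h (by simp)

-- pvHeapMin? returns the unique strict lexicographic minimum ------------------

theorem pvHeapFold_eq (m : Int × Int) :
    ∀ (l : List (Int × Int)) (acc : Option (Int × Int)),
      (∀ x ∈ l, x = m ∨ pvLexLt m x = true) →
      (acc = some m ∨ (m ∈ l ∧ (acc = none ∨ ∃ v, acc = some v ∧ pvLexLt m v = true))) →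
      l.foldl pvHeapStep acc = some m := by
  intro l
  induction l with
  | nil =>
    intro acc _ hacc
    rcases hacc with rfl | ⟨hm, _⟩
    · rfl
    · simp at hm
  | cons x t ih =>
    intro acc hl hacc
    have hx := hl x (by simp)
    have ht : ∀ y ∈ t, y = m ∨ pvLexLt m y = true := fun y hy => hl y (List.mem_cons_of_mem _ hy)
    simp only [List.foldl_cons]
    rcases hacc with rfl | ⟨hm, hacc⟩
    · have hstep : pvHeapStep (some m) x = some m := by
        rcases hx with rfl | hlt
        · simp [pvHeapStep, pvLexLt_irrefl]
        · simp [pvHeapStep, pvLexLt_asymm hlt]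
      rw [hstep]
      exact ih (some m) ht (Or.inl rfl)
    · rcases hacc with rfl | ⟨v, rfl, hv⟩
      · show List.foldl pvHeapStep (pvHeapStep none x) t = some m
        rw [show pvHeapStep none x = some x from rfl]
        rcases hx with hxm | hlt
        · rw [hxm]
          exact ih (some m) ht (Or.inl rfl)
        · have hmt : m ∈ t := by
            rcases List.mem_cons.mp hm with h | h
            · exact absurd h (pvLexLt_ne hlt)
            · exact h
          exact ih (some x) ht (Or.inr ⟨hmt, Or.inr ⟨x, rfl, hlt⟩⟩)
      · show List.foldl pvHeapStep (pvHeapStep (some v) x) t = some m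
        rcases hx with hxm | hlt
        · have hstep : pvHeapStep (some v) x = some x := by
            rw [hxm]
            simp [pvHeapStep, hv]
          rw [hstep, hxm]
          exact ih (some m) ht (Or.inl rfl)
        · have hmt : m ∈ t := by
            rcases List.mem_cons.mp hm with h | h
            · exact absurd h (pvLexLt_ne hlt)
            · exact h
          by_cases hxv : pvLexLt x v = true
          · rw [show pvHeapStep (some v) x = some x from by simp [pvHeapStep, hxv]]
            exact ih (some x) ht (Or.inr ⟨hmt, Or.inr ⟨x, rfl, hlt⟩⟩)
          · rw [show pvHeapStep (some v) x = some v from by simp [pvHeapStep, hxv]]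
            exact ih (some v) ht (Or.inr ⟨hmt, Or.inr ⟨v, rfl, hv⟩⟩)

theorem pvHeapMin?_eq (hp : List (Int × Int)) (m : Int × Int) (hmem : m ∈ hp)
    (hleast : ∀ x ∈ hp, x = m ∨ pvLexLt m x = true) : pvHeapMin? hp = some m :=
  pvHeapFold_eq m hp none hleast (Or.inr ⟨hmem, Or.inl rfl⟩)

-- first argmax of a key over 0..n-1 ------------------------------------------

def pvFA (k : Nat → Int) : Nat → Nat
  | 0 => 0
  | n+1 => if k (pvFA k n) < k n then n else pvFA k n

theorem pvFA_succ (k : Nat → Int) (n : Nat) :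
    pvFA k (n + 1) = if k (pvFA k n) < k n then n else pvFA k n := rfl

theorem pvFA_lt (k : Nat → Int) (n : Nat) (h : 0 < n) : pvFA k n < n := by
  induction n with
  | zero => omega
  | succ n ih =>
    rw [pvFA_succ]
    split
    · omega
    · rcases Nat.eq_zero_or_pos n with rfl | hn
      · simp [pvFA]
      · exact Nat.lt_succ_of_lt (ih hn)

theorem pvFA_lt_succ (k : Nat → Int) (n : Nat) : pvFA k n < n + 1 := by
  rcases Nat.eq_zero_or_pos n with rfl | hn
  · simp [pvFA]
  · exact Nat.lt_succ_of_lt (pvFA_lt k n hn)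

theorem pvFA_isMax (k : Nat → Int) (n : Nat) : ∀ j, j < n → k j ≤ k (pvFA k n) := by
  induction n with
  | zero => intro j hj; omega
  | succ n ih =>
    intro j hj
    rw [pvFA_succ]
    by_cases hlt : k (pvFA k n) < k n
    · rw [if_pos hlt]
      rcases Nat.lt_succ_iff_lt_or_eq.mp hj with h | rfl
      · exact le_of_lt (lt_of_le_of_lt (ih j h) hlt)
      · exact le_refl _
    · rw [if_neg hlt]
      rcases Nat.lt_succ_iff_lt_or_eq.mp hj with h | rfl
      · exact ih j h
      · omega

theorem pvFA_first (k : Nat → Int) (n : Nat) :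
    ∀ j, j < n → k (pvFA k n) ≤ k j → pvFA k n ≤ j := by
  induction n with
  | zero => intro j hj; omega
  | succ n ih =>
    intro j hj
    rw [pvFA_succ]
    by_cases hlt : k (pvFA k n) < k n
    · rw [if_pos hlt]
      intro hle
      rcases Nat.lt_succ_iff_lt_or_eq.mp hj with h | rfl
      · have h1 := pvFA_isMax k n j h
        omega
      · exact le_refl _
    · rw [if_neg hlt]
      intro hle
      rcases Nat.lt_succ_iff_lt_or_eq.mp hj with h | heq
      · exact ih j h hle
      · rw [heq]
        exact Nat.lt_succ_iff.mp (pvFA_lt_succ k n)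

theorem pvFA_congr (k1 k2 : Nat → Int) : ∀ (n : Nat), (∀ j, j < n → k1 j = k2 j) →
    pvFA k1 n = pvFA k2 n := by
  intro n
  induction n with
  | zero => intro _; rfl
  | succ n ih =>
    intro h
    have hn : pvFA k1 n = pvFA k2 n := ih (fun j hj => h j (Nat.lt_succ_of_lt hj))
    rw [pvFA_succ, pvFA_succ, hn, h (pvFA k2 n) (pvFA_lt_succ k2 n), h n (by omega)]

-- A's max over range(n) is the first argmax ----------------------------------

theorem pvMax?_snoc (l : List Int) (x : Int) (K : Int → Int) :
    PySem.List.max? (l ++ [x]) K = match PySem.List.max? l K with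
      | none => some x
      | some m => if K m < K x then some x else some m := by
  cases hA : PySem.List.max? l K with
  | none =>
    unfold PySem.List.max? at hA ⊢
    rw [List.foldl_append, hA]
    rfl
  | some m =>
    unfold PySem.List.max? at hA ⊢
    rw [List.foldl_append, hA]
    rfl

theorem pvMaxRange (K : Int → Int) : ∀ (n : Nat), 0 < n →
    PySem.List.max? (PySem.List.pyRange 0 (n : Int) 1) K
      = some ((pvFA (fun j => K (j : Int)) n : Nat) : Int) := by
  intro n
  induction n with
  | zero => omega
  | succ n ih =>
    intro _
    rcases Nat.eq_zero_or_pos n with rfl | hpos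
    · rw [show ((1 : Nat) : Int) = 0 + 1 from by norm_num, PySem.List.pyRange_one_singleton]
      unfold PySem.List.max?
      simp [pvFA]
    · rw [show ((n + 1 : Nat) : Int) = (n : Int) + 1 from by push_cast; ring,
        PySem.List.pyRange_one_succ_right (by positivity), pvMax?_snoc, ih hpos]
      show (if K ((pvFA (fun j => K (j : Int)) n : Nat) : Int) < K (n : Int) then some (n : Int)
            else some ((pvFA (fun j => K (j : Int)) n : Nat) : Int))
          = some ((pvFA (fun j => K (j : Int)) (n + 1) : Nat) : Int)
      simp only [pvFA]
      split <;> simp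


-- erasing one entry of the range map and pushing its replacement --------------

theorem pvErase_map_range (f f' : Nat → Int × Int) (n i : Nat) (hi : i < n)
    (vi vi' : Int × Int) (hvi : vi = f i) (hvi' : vi' = f' i)
    (hagree : ∀ j, j ≠ i → f' j = f j)
    (hne : ∀ j, j < n → j ≠ i → f j ≠ f i) :
    ((((List.range n).map f).erase vi) ++ [vi']).Perm ((List.range n).map f') := by
  subst hvi hvi'
  have hsplit : List.range n
      = (List.range i ++ [i]) ++ (List.range (n - i - 1)).map (fun k => i + 1 + k) := by
    conv_lhs => rw [show n = i + 1 + (n - i - 1) from by omega]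
    rw [List.range_add, List.range_succ]
  have hP : (List.range i).map f = (List.range i).map f' := by
    apply List.map_congr_left
    intro j hj
    rw [List.mem_range] at hj
    exact (hagree j (by omega)).symm
  have hT : ((List.range (n - i - 1)).map (fun k => i + 1 + k)).map f
      = ((List.range (n - i - 1)).map (fun k => i + 1 + k)).map f' := by
    apply List.map_congr_left
    intro j hj
    rcases List.mem_map.mp hj with ⟨k, _, rfl⟩
    exact (hagree _ (by omega)).symm
  have hnotinP : f i ∉ (List.range i).map f := by
    intro hmem
    rcases List.mem_map.mp hmem with ⟨j, hj, he⟩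
    rw [List.mem_range] at hj
    exact hne j (by omega) (by omega) he
  rw [hsplit]
  simp only [List.map_append, List.map_cons, List.map_nil]
  rw [List.append_assoc, List.append_assoc]
  rw [List.erase_append_right _ hnotinP]
  rw [show ([f i] ++ ((List.range (n - i - 1)).map (fun k => i + 1 + k)).map f)
      = f i :: ((List.range (n - i - 1)).map (fun k => i + 1 + k)).map f from rfl]
  rw [List.erase_cons_head, hP, hT]
  rw [List.append_assoc]
  exact List.Perm.append_left _ List.perm_append_comm

-- the invariant tying A's string state to B's numeric state ------------------

def pvInv (cleaned hs : List String) (tr : PySem.Set Int) (lens : List Int)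
    (counts : List Nat) (trimmed : List Bool) : Prop :=
  hs.length = cleaned.length ∧ lens.length = cleaned.length ∧
  counts.length = cleaned.length ∧ trimmed.length = cleaned.length ∧
  ∀ i, i < cleaned.length →
    (tr.contains (i : Int) = trimmed.getD i false) ∧
    lens.getD i 0 = PySem.Str.len (hs.getD i "") ∧
    (if trimmed.getD i false then
        1 ≤ counts.getD i 0 ∧
        counts.getD i 0 ≤ (PySem.Str.split₀ (cleaned.getD i "")).length ∧
        (hs.getD i "").toList = PySem.Chars.join [' ']
          (((PySem.Str.split₀ (cleaned.getD i "")).take (counts.getD i 0)).map String.toList)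
     else hs.getD i "" = cleaned.getD i "" ∧
        counts.getD i 0 = (PySem.Str.split₀ (cleaned.getD i "")).length)

theorem pvSplit_hs (cleaned hs : List String) (tr : PySem.Set Int) (lens : List Int)
    (counts : List Nat) (trimmed : List Bool) (hInv : pvInv cleaned hs tr lens counts trimmed)
    (i : Nat) (hi : i < cleaned.length) :
    PySem.Str.split₀ (hs.getD i "")
      = (PySem.Str.split₀ (cleaned.getD i "")).take (counts.getD i 0) := by
  obtain ⟨hlen, _, _, _, hP⟩ := hInv
  obtain ⟨_, _, h3⟩ := hP i hi
  by_cases ht : trimmed.getD i false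
  · simp only [ht, if_true] at h3
    obtain ⟨h1, h2, hjoin⟩ := h3
    rw [show PySem.Str.split₀ (hs.getD i "")
        = List.map String.ofList (PySem.Chars.split₀ (hs.getD i "").toList) from rfl, hjoin,
      pvSplit_join _ ?_, List.map_map]
    · simp [Function.comp_def]
    · intro w hw
      rcases List.mem_map.mp hw with ⟨x, hx, rfl⟩
      have hxW : x.toList ∈ PySem.Chars.split₀ (cleaned.getD i "").toList := by
        rw [← PySem.Str.split₀_map_toList]
        exact List.mem_map_of_mem (List.mem_of_mem_take hx)
      have hok := pvSplit_words _ _ hxW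
      exact ⟨hok.1, fun c hc => (hok.2 c hc).1⟩
  · simp only [Bool.not_eq_true] at ht
    simp only [ht, if_false, Bool.false_eq_true] at h3
    rw [h3.1, h3.2, List.take_length]

theorem pvSum_len (xs : List String) :
    (xs.map PySem.Str.len).sum = (((xs.map (fun s => s.toList.length)).sum : Nat) : Int) := by
  induction xs with
  | nil => simp
  | cons x t ih => simp [ih, PySem.Str.len]

-- length of " ".join of a word prefix ----------------------------------------

theorem pvJoinLen (W : List String) (j : Nat) (hj1 : 1 ≤ j) (hj : j ≤ W.length) :
    PySem.Str.len (PySem.Str.join " " (W.take j))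
      = ((W.take j).map PySem.Str.len).sum + (j : Int) - 1 := by
  have hjl := pvJoin_length ((W.take j).map String.toList)
    (List.ne_nil_of_length_pos (by rw [List.length_map, List.length_take]; omega))
  rw [show PySem.Str.len (PySem.Str.join " " (W.take j))
      = ((PySem.Chars.join [' '] ((W.take j).map String.toList)).length : Int) from by
    rw [PySem.Str.len_eq, PySem.Str.toList_join]; rfl]
  rw [pvSum_len]
  have hlt : (W.take j).length = j := by rw [List.length_take]; omega
  have hmm : ((W.take j).map String.toList).map List.length
      = (W.take j).map (fun s => s.toList.length) := by
    rw [List.map_map]; rfl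
  rw [hmm, List.length_map, hlt] at hjl
  omega

theorem pvInv_step (cleaned hs : List String) (tr : PySem.Set Int) (lens : List Int)
    (counts : List Nat) (trimmed : List Bool)
    (hInv : pvInv cleaned hs tr lens counts trimmed)
    (i : Nat) (hi : i < cleaned.length) (hc : 1 < counts.getD i 0) :
    pvInv cleaned
      (hs.set i (PySem.Str.join " " ((PySem.Str.split₀ (cleaned.getD i "")).take (counts.getD i 0 - 1))))
      (tr.add (i : Int))
      (lens.set i (PySem.Str.len (PySem.Str.join " " ((PySem.Str.split₀ (cleaned.getD i "")).take (counts.getD i 0 - 1)))))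
      (counts.set i (counts.getD i 0 - 1))
      (trimmed.set i true) := by
  obtain ⟨hlen, hlenL, hlenC, hlenT, hP⟩ := hInv
  set W := PySem.Str.split₀ (cleaned.getD i "") with hW
  set c := counts.getD i 0 with hcc
  have hcle : c ≤ W.length := by
    obtain ⟨-, -, h3⟩ := hP i hi
    by_cases ht : trimmed.getD i false
    · simp only [ht, if_true] at h3; exact h3.2.1
    · simp only [Bool.not_eq_true] at ht
      simp only [ht, if_false, Bool.false_eq_true] at h3
      exact le_of_eq h3.2
  refine ⟨by simpa using hlen, by simpa using hlenL, by simpa using hlenC, by simpa using hlenT, ?_⟩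
  intro k hk
  obtain ⟨hcont, hlenk, h3⟩ := hP k hk
  by_cases hki : k = i
  · subst hki
    rw [pvGetD_set trimmed k k true false (by omega), if_pos rfl,
        pvGetD_set counts k k (c - 1) 0 (by omega), if_pos rfl,
        pvGetD_set lens k k _ 0 (by omega), if_pos rfl,
        pvGetD_set hs k k _ "" (by omega), if_pos rfl]
    refine ⟨?_, rfl, ?_⟩
    · rw [pvContains_add]; simp
    · simp only [if_true]
      refine ⟨by omega, by rw [← hW]; omega, ?_⟩
      rw [← hW, PySem.Str.toList_join]
      rfl
  · rw [pvGetD_set trimmed i k true false (by omega),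
        pvGetD_set counts i k (c - 1) 0 (by omega),
        pvGetD_set lens i k _ 0 (by omega),
        pvGetD_set hs i k _ "" (by omega)]
    simp only [if_neg hki]
    refine ⟨?_, hlenk, h3⟩
    rw [pvContains_add, hcont]
    have : ((k : Int) == (i : Int)) = false := by
      simp [hki]
    rw [this, Bool.or_false]

-- the full B-state invariant --------------------------------------------------

def pvInvB (cleaned hs : List String) (tr : PySem.Set Int) (heap : List (Int × Int))
    (ws : List (List String)) (lens norms : List Int) (trimmed : List Bool) : Prop :=
  pvInv cleaned hs tr lens (ws.map List.length) trimmed ∧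
  ws.length = cleaned.length ∧
  (∀ i, i < cleaned.length →
    ws.getD i [] = (PySem.Str.split₀ (cleaned.getD i "")).take ((ws.getD i []).length)) ∧
  norms.length = cleaned.length ∧
  (∀ i, i < cleaned.length →
    norms.getD i 0 = ((ws.getD i []).map PySem.Str.len).sum + ((ws.getD i []).length : Int) - 1) ∧
  heap.Perm ((List.range cleaned.length).map (fun i => (-(lens.getD i 0), (i : Int))))

-- the lockstep simulation of A's while loop by B's heap loop -------------------

theorem pvLockstepB (cleaned : List String) (maxLen : Int) :
    ∀ (fuel : Nat) (hs : List String) (tr : PySem.Set Int) (heap : List (Int × Int))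
      (ws : List (List String)) (lens norms : List Int) (trimmed : List Bool) (combined : Int),
      pvInvB cleaned hs tr heap ws lens norms trimmed →
      combined = pvCombinedA hs →
      ∃ heapF lensF normsF,
        pvInvB cleaned (pvStep2A maxLen fuel (hs, tr)).1 (pvStep2A maxLen fuel (hs, tr)).2 heapF
          (pvLoopB maxLen fuel heap ws lens norms trimmed combined).1 lensF normsF
          (pvLoopB maxLen fuel heap ws lens norms trimmed combined).2 := by
  intro fuel
  induction fuel with
  | zero =>
    intro hs tr heap ws lens norms trimmed combined hInvB hcomb
    exact ⟨heap, lens, norms, hInvB⟩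
  | succ f ih =>
    intro hs tr heap ws lens norms trimmed combined hInvB hcomb
    obtain ⟨hInv, hWL, hpre, hNL, hnorm, hperm⟩ := hInvB
    obtain ⟨hlen, hlenL, hlenC, hlenT, hP⟩ := hInv
    have hInv' : pvInv cleaned hs tr lens (ws.map List.length) trimmed :=
      ⟨hlen, hlenL, hlenC, hlenT, hP⟩
    have hInvB' : pvInvB cleaned hs tr heap ws lens norms trimmed :=
      ⟨hInv', hWL, hpre, hNL, hnorm, hperm⟩
    simp only [pvStep2A, pvLoopB]
    by_cases hcond : combined > maxLen
    case neg =>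
      rw [if_neg (by rwa [← hcomb]), if_neg hcond]
      exact ⟨heap, lens, norms, hInvB'⟩
    case pos =>
      rw [if_pos (by rwa [← hcomb]), if_pos hcond]
      rcases Nat.eq_zero_or_pos cleaned.length with hn0 | hn
      · -- empty list: both selections come up empty (outside Pre_; nothing happens)
        have hA0 : PySem.List.max? (PySem.List.pyRange 0 (hs.length : Int) 1)
            (fun x => PySem.Str.len ((PySem.List.pyGet? hs x).getD "")) = none := by
          rw [show (hs.length : Int) = ((0 : Nat) : Int) from by rw [hlen, hn0],
            show (((0 : Nat) : Int)) = (0 : Int) from rfl,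
            PySem.List.pyRange_one_eq_nil (by omega), PySem.List.max?_eq_none_iff]
        have hheap : heap = [] := by
          have h2 := hperm
          rw [hn0] at h2
          simpa using h2.eq_nil
        have hB0 : pvHeapMin? heap = none := by rw [hheap]; rfl
        rw [hA0, hB0]
        exact ⟨heap, lens, norms, hInvB'⟩
      · -- nonempty: both sides select the same index i
        set n := cleaned.length with hnn
        set L : Nat → Int := fun j => lens.getD j 0 with hL
        set i := pvFA L n with hii
        have hiN : i < n := pvFA_lt L n hn
        have hKL : ∀ j, j < n → PySem.Str.len ((PySem.List.pyGet? hs (j : Int)).getD "") = L j := by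
          intro j hj
          have hjhs : j < hs.length := by omega
          rw [PySem.List.pyGet?_natCast, List.getElem?_eq_getElem hjhs, Option.getD_some]
          have h1 := (hP j hj).2.1
          rw [List.getD_eq_getElem lens 0 (by omega), List.getD_eq_getElem hs "" hjhs] at h1
          simp only [hL]
          rw [List.getD_eq_getElem lens 0 (by omega)]
          exact h1.symm
        have hmaxA : PySem.List.max? (PySem.List.pyRange 0 (hs.length : Int) 1)
            (fun x => PySem.Str.len ((PySem.List.pyGet? hs x).getD ""))
              = some ((i : Nat) : Int) := by
          have hcast : (hs.length : Int) = (n : Int) := by rw [hlen]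
          rw [hcast, pvMaxRange _ n hn]
          congr 1
          exact congrArg _ (pvFA_congr _ _ n (fun j hj => hKL j hj))
        have hm : pvHeapMin? heap = some (-(L i), (i : Int)) := by
          apply pvHeapMin?_eq
          · rw [hperm.mem_iff]
            refine List.mem_map.mpr ⟨i, List.mem_range.mpr hiN, ?_⟩
            simp [hL]
          · intro x hx
            rcases List.mem_map.mp (hperm.mem_iff.mp hx) with ⟨j, hj, rfl⟩
            rw [List.mem_range] at hj
            by_cases hji : j = i
            · subst hji
              left
              simp [hL]
            · right
              have hle : L j ≤ L i := by rw [hii]; exact pvFA_isMax L n j hj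
              have hfirst : L i ≤ L j → i ≤ j := by
                rw [hii]
                exact pvFA_first L n j hj
              have hLj : L j = lens.getD j 0 := by simp [hL]
              have hLi : L i = lens.getD i 0 := by simp [hL]
              simp only [pvLexLt, Bool.or_eq_true, Bool.and_eq_true, decide_eq_true_eq, beq_iff_eq]
              rcases lt_or_eq_of_le hle with hlt | heq2
              · exact Or.inl (by omega)
              · have hij : i ≤ j := hfirst (le_of_eq heq2.symm)
                refine Or.inr ⟨by omega, ?_⟩
                have hlt2 : i < j := by omega
                exact_mod_cast hlt2
        rw [hmaxA, hm]
        simp only [Int.toNat_natCast]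
        set W := PySem.Str.split₀ (cleaned.getD i "") with hW
        set c := (ws.getD i []).length with hcc
        have hcountsi : (ws.map List.length).getD i 0 = c := by
          rw [pvGetD_map List.length ws i 0 [] (by omega)]
        have hgetA : (PySem.List.pyGet? hs ((i : Nat) : Int)).getD "" = hs.getD i "" := by
          rw [PySem.List.pyGet?_natCast, List.getElem?_eq_getElem (by omega : i < hs.length),
            Option.getD_some, List.getD_eq_getElem hs "" (by omega)]
        have hsplit2 : PySem.Str.split₀ ((PySem.List.pyGet? hs ((i : Nat) : Int)).getD "")
            = W.take c := by
          rw [hgetA, pvSplit_hs cleaned hs tr lens (ws.map List.length) trimmed hInv' i hiN,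
            hcountsi]
        have hcleW : c ≤ W.length := by
          have h2 := hpre i hiN
          rw [← hcc, ← hW] at h2
          have hl2 := congrArg List.length h2
          rw [List.length_take] at hl2
          omega
        have hwlen : (W.take c).length = c := by rw [List.length_take]; omega
        rw [hsplit2, hwlen]
        by_cases hc1 : c ≤ 1
        · rw [if_neg (by omega), if_pos hc1]
          exact ⟨heap, lens, norms, hInvB'⟩
        · rw [if_pos (by omega), if_neg hc1]
          rw [pvSlice_neg_one, pvDropLast_take _ _ hcleW]
          set nv := norms.getD i 0 - PySem.Str.len ((ws.getD i []).getLastD "") - 1 with hnv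
          -- the popped word and the new length
          have hwlast : (ws.getD i []).getLastD "" = W.getD (c - 1) "" := by
            rw [hpre i hiN, ← hcc, ← hW]
            rw [List.getLastD_eq_getLast?, List.getLast?_eq_getElem?]
            rw [hwlen]
            rw [List.getElem?_take_of_lt (by omega),
              List.getElem?_eq_getElem (by omega : c - 1 < W.length)]
            rw [List.getD_eq_getElem W "" (by omega)]
            rfl
          have htakesucc : W.take c = W.take (c - 1) ++ [W.getD (c - 1) ""] := by
            rw [show c = (c - 1) + 1 from by omega, List.take_add_one,
              List.getElem?_eq_getElem (by omega : c - 1 < W.length)]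
            rw [List.getD_eq_getElem W "" (by omega)]
            rfl
          have hnewlen : nv = PySem.Str.len (PySem.Str.join " " (W.take (c - 1))) := by
            rw [hnv, hnorm i hiN, hwlast, ← hcc]
            rw [pvJoinLen W (c - 1) (by omega) (by omega)]
            have hsum : ((ws.getD i []).map PySem.Str.len).sum
                = ((W.take (c - 1)).map PySem.Str.len).sum
                  + PySem.Str.len (W.getD (c - 1) "") := by
              conv_lhs => rw [hpre i hiN, ← hcc, ← hW, htakesucc]
              simp
            rw [hsum]
            omega
          have hdropl : (ws.getD i []).dropLast = W.take (c - 1) := by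
            rw [hpre i hiN, ← hcc, ← hW, pvDropLast_take _ _ hcleW]
          have hmapset : (ws.set i ((ws.getD i []).dropLast)).map List.length
              = (ws.map List.length).set i (c - 1) := by
            rw [List.map_set]
            congr 1
            rw [List.length_dropLast, ← hcc]
          have hInvStep := pvInv_step cleaned hs tr lens (ws.map List.length) trimmed hInv'
            i hiN (by omega)
          rw [hcountsi, ← hW] at hInvStep
          apply ih
          · refine ⟨?_, by simpa using hWL, ?_, by simpa using hNL, ?_, ?_⟩
            · rw [hmapset, show lens.set i nv
                  = lens.set i (PySem.Str.len (PySem.Str.join " " (W.take (c - 1)))) from by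
                rw [hnewlen]]
              exact hInvStep
            · -- prefix property
              intro k hk
              by_cases hki : k = i
              · rw [hki]
                rw [pvGetD_set ws i i _ [] (by omega), if_pos rfl, hdropl, ← hW]
                rw [List.length_take]
                congr 1
                omega
              · rw [pvGetD_set ws i k _ [] (by omega)]
                simp only [if_neg hki]
                exact hpre k hk
            · -- norm property
              intro k hk
              by_cases hki : k = i
              · rw [hki]
                rw [pvGetD_set norms i i _ 0 (by omega), if_pos rfl,
                  pvGetD_set ws i i _ [] (by omega), if_pos rfl, hdropl, hnewlen,
                  pvJoinLen W (c - 1) (by omega) (by omega)]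
                rw [List.length_take]
                congr 2
                omega
              · rw [pvGetD_set norms i k _ 0 (by omega), pvGetD_set ws i k _ [] (by omega)]
                simp only [if_neg hki]
                exact hnorm k hk
            · -- heap permutation
              refine ((hperm.erase ((-(L i), (i : Int)))).append_right [(-nv, (i : Int))]).trans ?_
              refine pvErase_map_range (fun j : Nat => (-(lens.getD j 0), (j : Int)))
                (fun j : Nat => (-((lens.set i nv).getD j 0), (j : Int))) n i hiN
                _ _ ?_ ?_ ?_ ?_
              · simp [hL]
              · simp only
                rw [pvGetD_set lens i i nv 0 (by omega), if_pos rfl]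
              · intro j hji
                simp only
                rw [pvGetD_set lens i j nv 0 (by omega)]
                simp [hji]
              · intro j hjn hji he
                have h2 := congrArg Prod.snd he
                simp only at h2
                exact hji (by exact_mod_cast h2)
          · -- combined stays the true combined length
            rw [hcomb, hnewlen]
            have hset := pvSum_map_set hs i (PySem.Str.join " " (W.take (c - 1))) (by omega)
            have hlk : lens.getD i 0 = PySem.Str.len (hs.getD i "") := (hP i hiN).2.1
            unfold pvCombinedA at *
            rw [hset, hlk]
            ring

-- rendering the final state ----------------------------------------------------

theorem pvOutput_eqB (cleaned hs : List String) (tr : PySem.Set Int) (ws : List (List String))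
    (lens : List Int) (trimmed : List Bool)
    (hcl : ∀ x ∈ cleaned, ∀ c ∈ x.toList, pvPunctA.contains c = false)
    (hInv : pvInv cleaned hs tr lens (ws.map List.length) trimmed)
    (hWL : ws.length = cleaned.length)
    (hpre : ∀ i, i < cleaned.length →
      ws.getD i [] = (PySem.Str.split₀ (cleaned.getD i "")).take ((ws.getD i []).length)) :
    (PySem.List.enumerate hs).map (fun p =>
        if tr.contains p.1 && !(PySem.Str.endswith p.2 "..") then
          String.ofList (p.2.toList ++ " ..".toList)
        else p.2)
      = (List.range cleaned.length).map (fun i =>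
        if trimmed.getD i false then
          String.ofList ((PySem.Str.join " " (ws.getD i [])).toList ++ " ..".toList)
        else cleaned.getD i "") := by
  obtain ⟨hlen, hlenL, hlenC, hlenT, hP⟩ := hInv
  rw [pvEnumerate_map _ hs "" 0, hlen]
  apply List.map_congr_left
  intro k hk
  rw [List.mem_range] at hk
  obtain ⟨hcont, -, h3⟩ := hP k hk
  have hck : (ws.map List.length).getD k 0 = (ws.getD k []).length := by
    rw [pvGetD_map List.length ws k 0 [] (by omega)]
  simp only [zero_add]
  by_cases ht : trimmed.getD k false
  · simp only [ht, if_true] at h3 ⊢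
    obtain ⟨h1, h2, hjoin⟩ := h3
    -- '.' cannot occur in the trimmed headline, so it cannot end with ".."
    have hdot : ('.' : Char) ∉ (hs.getD k "").toList := by
      intro hmem
      rw [hjoin] at hmem
      rcases pvMem_join _ _ hmem with h | ⟨w, hw, hcw⟩
      · exact absurd h (by decide)
      · rcases List.mem_map.mp hw with ⟨x, hx, rfl⟩
        have hxW : x.toList ∈ PySem.Chars.split₀ (cleaned.getD k "").toList := by
          rw [← PySem.Str.split₀_map_toList]
          exact List.mem_map_of_mem (List.mem_of_mem_take hx)
        have hok := pvSplit_words _ _ hxW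
        have hmemcl : '.' ∈ (cleaned.getD k "").toList := (hok.2 '.' hcw).2
        have hcl' := hcl (cleaned.getD k "")
          (by rw [List.getD_eq_getElem cleaned "" hk]; exact List.getElem_mem hk) '.' hmemcl
        exact absurd hcl' (by decide)
    have hends : PySem.Str.endswith (hs.getD k "") ".." = false := by
      rw [PySem.Str.endswith_eq, Bool.eq_false_iff]
      intro htrue
      rw [PySem.Chars.endswith_iff] at htrue
      exact hdot (htrue.subset (by decide))
    rw [hcont, ht, hends]
    simp only [Bool.not_false, Bool.and_true, if_true]
    congr 1
    rw [hjoin, hck] at *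
    rw [hjoin]
    congr 1
    rw [PySem.Str.toList_join]
    rw [show (" ".toList) = [' '] from rfl]
    congr 1
    rw [hck] at hjoin ⊢
    conv_rhs => rw [hpre k hk]
  · simp only [Bool.not_eq_true] at ht
    simp only [ht, if_false, Bool.false_eq_true] at h3 ⊢
    rw [hcont, ht]
    simp only [Bool.false_and, if_false, Bool.false_eq_true]
    exact h3.1

theorem pvClean_eq : pvCleanB = pvTranslateDel := by
  have hc : ∀ c, pvPunctB.contains c = pvPunctA.contains c := by
    intro c
    rw [Bool.eq_iff_iff, PySem.Set.contains_iff, List.contains_iff_mem, pvPunctB, pvPunctA]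
    exact PySem.Set.mem_ofList _ c
  funext h
  unfold pvCleanB pvTranslateDel
  simp only [hc]

theorem pvInv_init (cleaned : List String) :
    pvInv cleaned cleaned (PySem.Set.ofList []) (cleaned.map (fun h => PySem.Str.len h))
      ((cleaned.map PySem.Str.split₀).map List.length) (List.replicate cleaned.length false) := by
  refine ⟨rfl, by simp, by simp, by simp, ?_⟩
  intro i hi
  refine ⟨?_, ?_, ?_⟩
  · rw [List.getD_eq_getElem (List.replicate _ false) false (by simpa using hi)]
    simp [PySem.Set.ofList]
  · rw [pvGetD_map (fun h => PySem.Str.len h) cleaned i 0 "" hi]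
  · rw [List.getD_eq_getElem (List.replicate _ false) false (by simpa using hi)]
    simp only [List.getElem_replicate, Bool.false_eq_true, if_false]
    refine ⟨by trivial, ?_⟩
    rw [pvGetD_map List.length _ i 0 [] (by simpa using hi),
      pvGetD_map PySem.Str.split₀ cleaned i [] "" hi]

theorem pvInvB_init (cleaned : List String) :
    pvInvB cleaned cleaned (PySem.Set.ofList [])
      ((List.range cleaned.length).map
        (fun i => (-((cleaned.map (fun h => PySem.Str.len h)).getD i 0), (i : Int))))
      (cleaned.map PySem.Str.split₀)
      (cleaned.map (fun h => PySem.Str.len h))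
      ((cleaned.map PySem.Str.split₀).map (fun w => (w.map PySem.Str.len).sum + (w.length : Int) - 1))
      (List.replicate cleaned.length false) := by
  refine ⟨pvInv_init cleaned, by simp, ?_, by simp, ?_, List.Perm.refl _⟩
  · intro i hi
    rw [pvGetD_map PySem.Str.split₀ cleaned i [] "" hi, List.take_length]
  · intro i hi
    rw [pvGetD_map (fun w => (w.map PySem.Str.len).sum + (w.length : Int) - 1)
        (cleaned.map PySem.Str.split₀) i 0 [] (by simpa using hi),
      pvGetD_map PySem.Str.split₀ cleaned i [] "" hi]

-- ===== VERDICT (by name: the statement is the Claim_ definition above) =====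
theorem reduce_to_300_chars_spec : Claim_equal_reduce_to_300_chars := by
  intro headlines additional_text _ _
  unfold Spec_reduce_to_300_chars
  simp only [reduce_to_300_chars, reduce_to_300_chars_alt]
  rw [pvClean_eq]
  set cleaned := headlines.map pvTranslateDel with hcleaned
  have hcl : ∀ x ∈ cleaned, ∀ c ∈ x.toList, pvPunctA.contains c = false := by
    intro x hx c hc
    rcases List.mem_map.mp hx with ⟨y, hy, rfl⟩
    unfold pvTranslateDel at hc
    rw [String.toList_ofList] at hc
    simpa using (List.mem_filter.mp hc).2
  have hnoc : ∀ x ∈ cleaned, (',' : Char) ∉ x.toList := by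
    intro x hx hmem
    exact absurd (hcl x hx ',' hmem) (by decide)
  rw [pvStep1_id cleaned hnoc, show PySem.Str.len "\n - " = 4 from by decide]
  obtain ⟨heapF, lensF, normsF, hInvF⟩ := pvLockstepB cleaned
    (296 - PySem.Str.len additional_text - 4 * (cleaned.length : Int))
    ((pvCombinedA cleaned).toNat + 1) cleaned (PySem.Set.ofList [])
    ((List.range cleaned.length).map
      (fun i => (-((cleaned.map (fun h => PySem.Str.len h)).getD i 0), (i : Int))))
    (cleaned.map PySem.Str.split₀)
    (cleaned.map (fun h => PySem.Str.len h))
    ((cleaned.map PySem.Str.split₀).map (fun w => (w.map PySem.Str.len).sum + (w.length : Int) - 1))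
    (List.replicate cleaned.length false)
    ((cleaned.map (fun h => PySem.Str.len h)).sum)
    (pvInvB_init cleaned) rfl
  obtain ⟨hInv, hWL, hpre, -, -, -⟩ := hInvF
  exact pvOutput_eqB cleaned _ _ _ _ _ hcl hInv hWL hpre
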